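-- pv_equiv track=rewrite | github.com/chenran-zlw/bpf-tools | show_udp_runtime_irq.py | is_cpu_in_affinity_list
-- ===== SOURCE A (Python) =====
-- def is_cpu_in_affinity_list(affinity_str, cpu_id):
--     for part in affinity_str.split(','):
--         if '-' in part:
--             try:
--                 start, end = map(int, part.split('-'))
--                 if start <= cpu_id <= end:
--                     return True
--             except ValueError:
--                 continue
--         else:
--             try:
--                 if int(part) == cpu_id:
--                     return True
--             except ValueError:
--                 continue
--     return False
-- ===== SOURCE B (Python) =====
-- def _parse(part):
--     """One comma token -> inclusive (lo, hi) interval, or None if malformed."""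
--     try:
--         if '-' in part:
--             lo, hi = map(int, part.split('-'))
--             return (lo, hi)
--         v = int(part)
--         return (v, v)
--     except ValueError:
--         return None
--
-- def is_cpu_in_affinity_list(affinity_str, cpu_id):
--     # Stage 1: parse every token into an interval.
--     ivs = sorted(iv for iv in map(_parse, affinity_str.split(',')) if iv is not None)
--     # Stage 2: coalesce sorted intervals into disjoint, ordered intervals.
--     merged = []
--     for lo, hi in ivs:
--         if merged and lo <= merged[-1][1] + 1:
--             merged[-1] = (merged[-1][0], max(merged[-1][1], hi))
--         else:
--             merged.append((lo, hi))
--     # Stage 3: binary search for the rightmost interval with lo <= cpu_id.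
--     lo_i, hi_i = 0, len(merged)
--     while lo_i < hi_i:
--         mid = (lo_i + hi_i) // 2
--         if merged[mid][0] <= cpu_id:
--             lo_i = mid + 1
--         else:
--             hi_i = mid
--     return lo_i > 0 and cpu_id <= merged[lo_i - 1][1]
-- ===== Notes on version B (the rewrite author's own statement) =====
-- stated objective: alternative
-- what changed: B replaces A's first-match linear scan by a three-stage algorithm: parse every token into an inclusive interval, sort and coalesce the intervals into a disjoint ordered list, then locate cpu_id with a hand-written binary search over the coalesced intervals.
import Mathlib
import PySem

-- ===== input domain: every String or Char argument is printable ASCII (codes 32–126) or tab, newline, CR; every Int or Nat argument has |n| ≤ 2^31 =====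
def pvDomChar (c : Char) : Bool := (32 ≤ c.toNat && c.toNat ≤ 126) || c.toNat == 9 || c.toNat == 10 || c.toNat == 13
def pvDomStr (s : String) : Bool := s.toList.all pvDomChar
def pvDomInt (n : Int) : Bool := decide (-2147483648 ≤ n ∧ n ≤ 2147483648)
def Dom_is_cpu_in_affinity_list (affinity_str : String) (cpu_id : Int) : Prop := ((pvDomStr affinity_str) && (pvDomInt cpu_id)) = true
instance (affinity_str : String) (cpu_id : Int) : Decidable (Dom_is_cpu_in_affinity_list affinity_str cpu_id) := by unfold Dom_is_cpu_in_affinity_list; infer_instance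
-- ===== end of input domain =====

-- B replaces A's first-match token scan by a different algorithm: parse all tokens to intervals, sort and coalesce them into disjoint ordered intervals, then binary-search for cpu_id; alternative decomposition, not claimed faster.

-- ===== PORT A =====
-- A's loop: first token whose range/value matches returns True; malformed tokens (ValueError) are skipped.
def pvALoop : List String → Int → Bool
  | [], _ => false
  | p :: rest, cpu =>
    if PySem.Str.isIn "-" p then
      -- try: start, end = map(int, part.split('-')) — any other shape or parse failure is a ValueError, i.e. skip
      match (PySem.Str.split? p "-").getD [] with
      | [a, b] =>
        match PySem.Int.ofStr? a, PySem.Int.ofStr? b with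
        | some st, some en => if st ≤ cpu ∧ cpu ≤ en then true else pvALoop rest cpu
        | _, _ => pvALoop rest cpu
      | _ => pvALoop rest cpu
    else
      match PySem.Int.ofStr? p with
      | some v => if v == cpu then true else pvALoop rest cpu
      | none => pvALoop rest cpu

def is_cpu_in_affinity_list (affinity_str : String) (cpu_id : Int) : Bool :=
  pvALoop ((PySem.Str.split? affinity_str ",").getD []) cpu_id

-- ===== PORT B =====
-- _parse(part): one token -> Option (lo, hi); the split separators are nonempty, so split? is `some` and .getD [] is never taken
def pvParse (part : String) : Option (Int × Int) :=
  if PySem.Str.isIn "-" part then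
    match (PySem.Str.split? part "-").getD [] with
    | [a, b] =>
      match PySem.Int.ofStr? a, PySem.Int.ofStr? b with
      | some lo, some hi => some (lo, hi)
      | _, _ => none
    | _ => none
  else
    (PySem.Int.ofStr? part).map (fun v => (v, v))

-- one iteration of B's coalescing loop over the sorted intervals
def pvMergeStep (merged : List (Int × Int)) (iv : Int × Int) : List (Int × Int) :=
  match merged.getLast? with
  | some last =>
    if iv.1 ≤ last.2 + 1 then merged.dropLast ++ [(last.1, max last.2 iv.2)]
    else merged ++ [iv]
  | none => merged ++ [iv]

-- B's hand-written binary search (rightmost index r with merged[k].lo <= cpu for all k < r)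
def pvBSearch (merged : List (Int × Int)) (cpu : Int) (lo hi : Nat) : Nat :=
  if lo < hi then
    let mid := (lo + hi) / 2
    if (merged.getD mid (0, 0)).1 ≤ cpu then pvBSearch merged cpu (mid + 1) hi
    else pvBSearch merged cpu lo mid
  else lo
termination_by hi - lo

def is_cpu_in_affinity_list_alt (affinity_str : String) (cpu_id : Int) : Bool :=
  let ivs := PySem.List.sorted2
    ((((PySem.Str.split? affinity_str ",").getD []).filterMap pvParse)) (·.1) (·.2)
  let merged := ivs.foldl pvMergeStep []
  let r := pvBSearch merged cpu_id 0 merged.length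
  decide (0 < r) && decide (cpu_id ≤ (merged.getD (r - 1) (0, 0)).2)

-- ===== PRECONDITION & SPEC =====
def Spec_is_cpu_in_affinity_list (affinity_str : String) (cpu_id : Int) (out : Bool) : Prop := out = is_cpu_in_affinity_list_alt affinity_str cpu_id
instance (affinity_str : String) (cpu_id : Int) (out : Bool) : Decidable (Spec_is_cpu_in_affinity_list affinity_str cpu_id out) := by unfold Spec_is_cpu_in_affinity_list; infer_instance

-- ===== CLAIM (what is proved, stated in full; the proofs are below) =====
def Claim_equal_is_cpu_in_affinity_list : Prop := ∀ (affinity_str : String) (cpu_id : Int), Dom_is_cpu_in_affinity_list affinity_str cpu_id → Spec_is_cpu_in_affinity_list affinity_str cpu_id (is_cpu_in_affinity_list affinity_str cpu_id)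

-- ===== LEMMAS AND PROOFS =====

-- "interval iv contains cpu"
def pvIn (cpu : Int) (iv : Int × Int) : Prop := iv.1 ≤ cpu ∧ cpu ≤ iv.2

-- A's loop is the any-token-covers test, phrased through B's parser
lemma pvALoop_eq (parts : List String) (cpu : Int) :
    pvALoop parts cpu
      = parts.any (fun p =>
          match pvParse p with
          | some iv => decide (iv.1 ≤ cpu) && decide (cpu ≤ iv.2)
          | none => false) := by
  induction parts with
  | nil => rfl
  | cons p rest ih =>
    rw [List.any_cons, ← ih, pvALoop]
    unfold pvParse
    by_cases hin : PySem.Str.isIn "-" p = true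
    · rw [if_pos hin, if_pos hin]
      match hsp : (PySem.Str.split? p "-").getD [] with
      | [] => simp
      | [x] => simp
      | [a, b] =>
        cases hx : PySem.Int.ofStr? a <;> cases hy : PySem.Int.ofStr? b
        · simp [hx, hy]
        · simp [hx, hy]
        · simp [hx, hy]
        · simp only [hx, hy]
          split_ifs with h
          · simp [h.1, h.2]
          · rcases not_and_or.mp h with h1 | h1 <;> simp [h1]
      | a :: b :: c :: t => simp
    · rw [if_neg hin, if_neg hin]
      cases hv : PySem.Int.ofStr? p with
      | none => simp
      | some v =>
        simp only [Option.map_some]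
        by_cases hvc : v = cpu
        · subst hvc; simp
        · have h1 : ¬ (v ≤ cpu ∧ cpu ≤ v) := by omega
          rcases not_and_or.mp h1 with h2 | h2 <;> simp [hvc, h2]

-- the strict lexicographic comparator sorted2 folds with
def pvLex (a b : Int × Int) : Bool :=
  decide (a.1 < b.1) || (!decide (b.1 < a.1) && decide (a.2 < b.2))

lemma pvLex_iff (a b : Int × Int) :
    pvLex a b = true ↔ (a.1 < b.1 ∨ (¬ b.1 < a.1 ∧ a.2 < b.2)) := by
  simp [pvLex]

lemma pvLex_asymm {a b : Int × Int} (h : pvLex a b = true) : pvLex b a = false := by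
  rw [pvLex_iff] at h
  rw [Bool.eq_false_iff, Ne, pvLex_iff]
  omega

lemma pvLex_trans {a b c : Int × Int} (h1 : pvLex a b = true) (h2 : pvLex b c = true) :
    pvLex a c = true := by
  rw [pvLex_iff] at h1 h2 ⊢
  omega

-- insertion into a pvLex-sorted list stays sorted
lemma pvInsertBy_pairwise (x : Int × Int) (acc : List (Int × Int))
    (h : acc.Pairwise (fun a b => pvLex b a = false)) :
    (PySem.List.insertBy pvLex x acc).Pairwise (fun a b => pvLex b a = false) := by
  induction acc with
  | nil => simp [PySem.List.insertBy]
  | cons y ys ih =>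
    rw [List.pairwise_cons] at h
    rw [PySem.List.insertBy]
    by_cases hxy : pvLex x y = true
    · rw [if_pos hxy]
      refine List.Pairwise.cons ?_ (List.Pairwise.cons h.1 h.2)
      intro z hz
      rcases List.mem_cons.mp hz with rfl | hz
      · exact pvLex_asymm hxy
      · by_cases hzx : pvLex z x = true
        · have := pvLex_trans hzx hxy
          exact absurd this (by simp [h.1 z hz])
        · simpa using hzx
    · rw [if_neg hxy]
      refine List.Pairwise.cons ?_ (ih h.2)
      intro z hz
      have hz' := (PySem.List.mem_insertBy pvLex x z ys).mp hz
      rcases hz' with rfl | hz'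
      · simpa using hxy
      · exact h.1 z hz'

lemma pvSorted2_pairwise (xs : List (Int × Int)) :
    (PySem.List.sorted2 xs (·.1) (·.2) false).Pairwise (fun a b => pvLex b a = false) := by
  show (xs.foldl (fun acc x => PySem.List.insertBy pvLex x acc) []).Pairwise _
  have : ∀ (l : List (Int × Int)) (acc : List (Int × Int)),
      acc.Pairwise (fun a b => pvLex b a = false) →
      (l.foldl (fun acc x => PySem.List.insertBy pvLex x acc) acc).Pairwise
        (fun a b => pvLex b a = false) := by
    intro l
    induction l with
    | nil => intro acc h; simpa using h
    | cons x rest ih =>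
      intro acc h
      exact ih _ (pvInsertBy_pairwise x acc h)
  exact this xs [] (by simp)

lemma pvSorted2_lo_mono (xs : List (Int × Int)) :
    (PySem.List.sorted2 xs (·.1) (·.2) false).Pairwise (fun a b => a.1 ≤ b.1) := by
  refine (pvSorted2_pairwise xs).imp ?_
  intro a b h
  by_contra hc
  have : pvLex b a = true := by
    simp only [pvLex, Bool.or_eq_true, decide_eq_true_iff]
    exact Or.inl (by omega)
  rw [h] at this
  exact Bool.false_ne_true this

-- merge invariant: fold of pvMergeStep keeps los nondecreasing, gaps between consecutive
-- intervals, and covers exactly the union of the inputs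
lemma pvMerge_inv (ivs : List (Int × Int)) (cpu : Int) :
    ∀ (acc : List (Int × Int)),
    ivs.Pairwise (fun a b => a.1 ≤ b.1) →
    acc.Pairwise (fun a b => a.1 ≤ b.1) →
    acc.IsChain (fun a b => a.2 + 1 < b.1) →
    (∀ a ∈ acc, ∀ t ∈ ivs, a.1 ≤ t.1) →
    ((ivs.foldl pvMergeStep acc).Pairwise (fun a b => a.1 ≤ b.1) ∧
     (ivs.foldl pvMergeStep acc).IsChain (fun a b => a.2 + 1 < b.1) ∧
     ((∃ iv ∈ ivs.foldl pvMergeStep acc, pvIn cpu iv) ↔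
        ((∃ iv ∈ acc, pvIn cpu iv) ∨ (∃ iv ∈ ivs, pvIn cpu iv)))) := by
  induction ivs with
  | nil =>
    intro acc _ h1 h2 _
    refine ⟨h1, h2, ?_⟩
    simp
  | cons t rest ih =>
    intro acc hs h1 h2 h3
    rw [List.pairwise_cons] at hs
    rw [List.foldl_cons]
    -- analyse the one merge step
    have hstep :
        (pvMergeStep acc t).Pairwise (fun a b => a.1 ≤ b.1) ∧
        (pvMergeStep acc t).IsChain (fun a b => a.2 + 1 < b.1) ∧
        (∀ a ∈ pvMergeStep acc t, ∀ u ∈ rest, a.1 ≤ u.1) ∧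
        ((∃ iv ∈ pvMergeStep acc t, pvIn cpu iv) ↔
          ((∃ iv ∈ acc, pvIn cpu iv) ∨ pvIn cpu t)) := by
      cases hlast : acc.getLast? with
      | none =>
        have hacc : acc = [] := List.getLast?_eq_none_iff.mp hlast
        subst hacc
        have he : pvMergeStep [] t = [t] := by rfl
        rw [he]
        refine ⟨by simp, List.IsChain.singleton t, ?_, by simp⟩
        intro a ha u hu
        rw [List.mem_singleton] at ha
        subst ha
        exact hs.1 u hu
      | some last =>
        have hpre : acc.dropLast ++ [last] = acc := List.dropLast_append_getLast? last hlast
        have hlast_lo_le : last.1 ≤ t.1 := by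
          refine h3 last ?_ t List.mem_cons_self
          rw [← hpre]; simp
        have hpre_le_last : ∀ a ∈ acc.dropLast, a.1 ≤ last.1 := by
          intro a ha
          have h1' := h1
          rw [← hpre, List.pairwise_append] at h1'
          exact h1'.2.2 a ha last (by simp)
        have h1p : acc.dropLast.Pairwise (fun a b => a.1 ≤ b.1) := by
          rw [← hpre, List.pairwise_append] at h1; exact h1.1
        have h2p := (List.isChain_append.mp (hpre ▸ h2 : (acc.dropLast ++ [last]).IsChain _))
        by_cases hcl : t.1 ≤ last.2 + 1
        · have he : pvMergeStep acc t = acc.dropLast ++ [(last.1, max last.2 t.2)] := by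
            rw [pvMergeStep, hlast]; simp [hcl]
          rw [he]
          refine ⟨?_, ?_, ?_, ?_⟩
          · rw [List.pairwise_append]
            refine ⟨h1p, by simp, ?_⟩
            intro a ha b hb
            rw [List.mem_singleton] at hb
            subst hb
            exact hpre_le_last a ha
          · refine List.isChain_append.mpr ⟨h2p.1, List.IsChain.singleton _, ?_⟩
            intro x hx y hy
            simp only [List.head?_cons, Option.mem_def, Option.some.injEq] at hy
            have hlink := h2p.2.2 x hx last (by simp)
            subst hy
            simpa using hlink
          · intro a ha u hu
            rcases List.mem_append.mp ha with ha | ha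
            · exact h3 a (by rw [← hpre]; exact List.mem_append_left _ ha) u (List.mem_cons_of_mem _ hu)
            · rw [List.mem_singleton] at ha
              subst ha
              simpa using le_trans hlast_lo_le (hs.1 u hu)
          · constructor
            · rintro ⟨iv, hiv, hin⟩
              rcases List.mem_append.mp hiv with hiv | hiv
              · exact Or.inl ⟨iv, by rw [← hpre]; exact List.mem_append_left _ hiv, hin⟩
              · rw [List.mem_singleton] at hiv
                subst hiv
                rcases hin with ⟨hx1, hx2⟩
                simp only at hx1 hx2
                by_cases hc : cpu ≤ last.2
                · exact Or.inl ⟨last, by rw [← hpre]; simp, hx1, hc⟩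
                · rcases le_max_iff.mp hx2 with h4 | h4
                  · exact absurd h4 (by omega)
                  · exact Or.inr ⟨by omega, h4⟩
            · rintro (⟨iv, hiv, hin⟩ | hin)
              · rw [← hpre] at hiv
                rcases List.mem_append.mp hiv with hiv | hiv
                · exact ⟨iv, List.mem_append_left _ hiv, hin⟩
                · rw [List.mem_singleton] at hiv
                  rw [hiv] at hin
                  obtain ⟨hin1, hin2⟩ := hin
                  exact ⟨(last.1, max last.2 t.2), by simp,
                    hin1, le_trans hin2 (le_max_left _ _)⟩
              · obtain ⟨hin1, hin2⟩ := hin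
                exact ⟨(last.1, max last.2 t.2), by simp,
                  by simp only []; omega, le_trans hin2 (le_max_right _ _)⟩
        · have he : pvMergeStep acc t = acc ++ [t] := by
            rw [pvMergeStep, hlast]; simp [hcl]
          rw [he]
          have hgap : last.2 + 1 < t.1 := by omega
          refine ⟨?_, ?_, ?_, ?_⟩
          · rw [List.pairwise_append]
            refine ⟨h1, by simp, ?_⟩
            intro a ha b hb
            rw [List.mem_singleton] at hb
            rw [hb]
            exact h3 a ha t List.mem_cons_self
          · refine List.isChain_append.mpr ⟨h2, List.IsChain.singleton _, ?_⟩
            intro x hx y hy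
            simp only [List.head?_cons, Option.mem_def, Option.some.injEq] at hy
            rw [Option.mem_def, hlast, Option.some.injEq] at hx
            subst hx; subst hy
            exact hgap
          · intro a ha u hu
            rcases List.mem_append.mp ha with ha | ha
            · exact h3 a ha u (List.mem_cons_of_mem _ hu)
            · rw [List.mem_singleton] at ha
              subst ha
              exact hs.1 u hu
          · constructor
            · rintro ⟨iv, hiv, hin⟩
              rcases List.mem_append.mp hiv with hiv | hiv
              · exact Or.inl ⟨iv, hiv, hin⟩
              · rw [List.mem_singleton] at hiv
                subst hiv
                exact Or.inr hin
            · rintro (⟨iv, hiv, hin⟩ | hin)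
              · exact ⟨iv, List.mem_append_left _ hiv, hin⟩
              · exact ⟨t, List.mem_append_right _ (by simp), hin⟩
    obtain ⟨s1, s2, s3, s4⟩ := hstep
    obtain ⟨r1, r2, r3⟩ := ih (pvMergeStep acc t) hs.2 s1 s2 s3
    refine ⟨r1, r2, ?_⟩
    rw [r3, s4]
    constructor
    · rintro ((h | h) | h)
      · exact Or.inl h
      · exact Or.inr ⟨t, List.mem_cons_self, h⟩
      · obtain ⟨iv, hiv, hin⟩ := h
        exact Or.inr ⟨iv, List.mem_cons_of_mem _ hiv, hin⟩
    · rintro (h | ⟨iv, hiv, hin⟩)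
      · exact Or.inl (Or.inl h)
      · rcases List.mem_cons.mp hiv with rfl | hiv
        · exact Or.inl (Or.inr hin)
        · exact Or.inr ⟨iv, hiv, hin⟩

-- binary-search postcondition: the result r satisfies lo-boundary and hi-boundary tests
lemma pvBSearch_spec (m : List (Int × Int)) (cpu : Int) :
    ∀ (n lo hi : Nat), hi - lo = n → lo ≤ hi → hi ≤ m.length →
    (lo = 0 ∨ (m.getD (lo - 1) (0, 0)).1 ≤ cpu) →
    (hi = m.length ∨ cpu < (m.getD hi (0, 0)).1) →
    (lo ≤ pvBSearch m cpu lo hi ∧ pvBSearch m cpu lo hi ≤ hi ∧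
     (pvBSearch m cpu lo hi = 0 ∨ (m.getD (pvBSearch m cpu lo hi - 1) (0, 0)).1 ≤ cpu) ∧
     (pvBSearch m cpu lo hi = m.length ∨ cpu < (m.getD (pvBSearch m cpu lo hi) (0, 0)).1)) := by
  intro n
  induction n using Nat.strong_induction_on with
  | _ n ihn =>
    intro lo hi hn hlohi hhi hlob hhib
    rw [pvBSearch]
    by_cases h : lo < hi
    · rw [if_pos h]
      simp only
      have hmid1 : lo ≤ (lo + hi) / 2 := by omega
      have hmid2 : (lo + hi) / 2 < hi := by omega
      by_cases hm : (m.getD ((lo + hi) / 2) (0, 0)).1 ≤ cpu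
      · rw [if_pos hm]
        have hrec := ihn (hi - ((lo + hi) / 2 + 1)) (by omega) ((lo + hi) / 2 + 1) hi rfl
          (by omega) hhi (Or.inr (by simpa using hm)) hhib
        exact ⟨by omega, hrec.2.1, hrec.2.2.1, hrec.2.2.2⟩
      · rw [if_neg hm]
        have hrec := ihn ((lo + hi) / 2 - lo) (by omega) lo ((lo + hi) / 2) rfl
          (by omega) (by omega) hlob (Or.inr (by omega))
        exact ⟨hrec.1, by omega, hrec.2.2.1, hrec.2.2.2⟩
    · rw [if_neg h]
      have : lo = hi := by omega
      subst this
      exact ⟨le_refl _, le_refl _, hlob, hhib⟩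

-- the boolean B computes from merged list and search result, characterised as coverage
lemma pvFinal_iff (m : List (Int × Int)) (cpu : Int)
    (h1 : m.Pairwise (fun a b => a.1 ≤ b.1))
    (h2 : m.IsChain (fun a b => a.2 + 1 < b.1)) :
    ((decide (0 < pvBSearch m cpu 0 m.length) &&
      decide (cpu ≤ (m.getD (pvBSearch m cpu 0 m.length - 1) (0, 0)).2)) = true
      ↔ ∃ iv ∈ m, pvIn cpu iv) := by
  obtain ⟨-, hrle, hlob, hhib⟩ :=
    pvBSearch_spec m cpu m.length 0 m.length rfl (Nat.zero_le _) le_rfl (Or.inl rfl) (Or.inl rfl)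
  set r := pvBSearch m cpu 0 m.length with hr
  rw [Bool.and_eq_true, decide_eq_true_iff, decide_eq_true_iff]
  constructor
  · rintro ⟨hpos, hhi⟩
    have hidx : r - 1 < m.length := by omega
    have hlo : (m.getD (r - 1) (0, 0)).1 ≤ cpu := by
      rcases hlob with h | h
      · omega
      · exact h
    rw [List.getD_eq_getElem m (0, 0) hidx] at hlo hhi
    exact ⟨m[r - 1], List.getElem_mem hidx, hlo, hhi⟩
  · rintro ⟨iv, hiv, hin1, hin2⟩
    obtain ⟨i, hi, hieq⟩ := List.mem_iff_getElem.mp hiv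
    have hir : i < r := by
      by_contra hc
      have hc : r ≤ i := Nat.le_of_not_lt hc
      have hrlen : r < m.length := by omega
      rcases hhib with h | h
      · omega
      · rw [List.getD_eq_getElem m (0, 0) hrlen] at h
        have hmono : m[r].1 ≤ m[i].1 := by
          rcases Nat.eq_or_lt_of_le hc with rfl | hlt
          · exact le_refl _
          · exact List.pairwise_iff_getElem.mp h1 r i hrlen hi hlt
        rw [hieq] at hmono
        omega
    have hpos : 0 < r := by omega
    refine ⟨hpos, ?_⟩
    have hidx : r - 1 < m.length := by omega
    rw [List.getD_eq_getElem m (0, 0) hidx]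
    have hlo : m[r - 1].1 ≤ cpu := by
      rcases hlob with h | h
      · omega
      · rwa [List.getD_eq_getElem m (0, 0) hidx] at h
    rcases Nat.eq_or_lt_of_le (Nat.le_sub_one_of_lt hir) with heq | hlt
    · subst heq
      rw [hieq]
      exact hin2
    · -- i < r - 1: the gap between m[i] and m[i+1] contradicts coverage
      exfalso
      have hi1 : i + 1 < m.length := by omega
      have hgap : m[i].2 + 1 < m[i + 1].1 := List.IsChain.getElem h2 i hi1
      have hmono : m[i + 1].1 ≤ m[r - 1].1 := by
        rcases Nat.lt_or_ge (i + 1) (r - 1) with hlt2 | hge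
        · exact List.pairwise_iff_getElem.mp h1 (i + 1) (r - 1) hi1 hidx hlt2
        · have hieq1 : i + 1 = r - 1 := by omega
          have e1 : m[i + 1] = m.getD (i + 1) (0, 0) := (List.getD_eq_getElem m (0, 0) hi1).symm
          have e2 : m.getD (r - 1) (0, 0) = m[r - 1] := List.getD_eq_getElem m (0, 0) hidx
          rw [e1, hieq1, e2]
      rw [hieq] at hgap
      omega

theorem is_cpu_in_affinity_list_spec : Claim_equal_is_cpu_in_affinity_list := by
  intro affinity_str cpu _
  unfold Spec_is_cpu_in_affinity_list is_cpu_in_affinity_list is_cpu_in_affinity_list_alt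
  simp only []
  set parts := (PySem.Str.split? affinity_str ",").getD [] with hparts
  set ivs0 := parts.filterMap pvParse with hivs0
  set ivs := PySem.List.sorted2 ivs0 (·.1) (·.2) false with hivs
  set m := ivs.foldl pvMergeStep [] with hm
  obtain ⟨hmono, hchain, hcov⟩ :=
    pvMerge_inv ivs cpu [] (pvSorted2_lo_mono ivs0) (by simp) (by simp) (by simp)
  rw [Bool.eq_iff_iff, pvALoop_eq, pvFinal_iff m cpu hmono hchain, hcov]
  simp only [List.not_mem_nil, false_and, exists_false, false_or]
  rw [List.any_eq_true]
  constructor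
  · rintro ⟨p, hp, hmatch⟩
    cases hpp : pvParse p with
    | none => rw [hpp] at hmatch; simp at hmatch
    | some iv =>
      rw [hpp] at hmatch
      simp only [Bool.and_eq_true, decide_eq_true_iff] at hmatch
      refine ⟨iv, ?_, hmatch.1, hmatch.2⟩
      rw [hivs, (PySem.List.sorted2_perm ivs0 (·.1) (·.2) false).mem_iff]
      exact List.mem_filterMap.mpr ⟨p, hp, hpp⟩
  · rintro ⟨iv, hiv, hin1, hin2⟩
    rw [hivs, (PySem.List.sorted2_perm ivs0 (·.1) (·.2) false).mem_iff, hivs0,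
      List.mem_filterMap] at hiv
    obtain ⟨p, hp, hpp⟩ := hiv
    refine ⟨p, hp, ?_⟩
    rw [hpp]
    simp [hin1, hin2]
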